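-- pv_equiv track=rewrite | github.com/danwein8/ROS2-Simulation | warehouse_gz/warehouse_gz/fleet_client.py | paths_to_timesteps
-- ===== SOURCE A (Python) =====
-- from typing import Dict, List, Optional, Tuple
--
-- def paths_to_timesteps(
--         paths: Dict[str, List[Tuple[int, int]]]
-- ) -> List[Dict[str, Tuple[int, int]]]:
--     """convert {robot: [cells]} into [{robot: cell_at_t}, ...]
--
--     Pads shorter paths by repeating the final cell so a robot that
--     finishes early just sits at its goal while others catch up
--     """
--     if not paths:
--         return []
--     max_len = max(len(p) for p in paths.values())
--     timesteps = []
--     for t in range(max_len):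
--         step = {}
--         for robot, cells in paths.items():
--             step[robot] = cells[t] if t < len(cells) else cells[-1]
--         timesteps.append(step)
--     return timesteps
-- ===== SOURCE B (Python) =====
-- from typing import Dict, List, Tuple
--
--
-- def paths_to_timesteps(
--         paths: Dict[str, List[Tuple[int, int]]]
-- ) -> List[Dict[str, Tuple[int, int]]]:
--     """Pad every path to the common length, then transpose column-wise."""
--     if not paths:
--         return []
--     keys = list(paths)
--     max_len = max(len(c) for c in paths.values())
--     padded = [c if len(c) == max_len else c + [c[-1]] * (max_len - len(c))
--               for c in paths.values()]
--     return [dict(zip(keys, column)) for column in zip(*padded)]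
-- ===== Notes on version B (the rewrite author's own statement) =====
-- stated objective: alternative
-- what changed: B pads every path once to the common max length and then transposes the padded table column-wise (zip(*padded)), instead of A's per-timestep loop that re-selects cells[t]-or-cells[-1] for every robot at every step.
import Mathlib
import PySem

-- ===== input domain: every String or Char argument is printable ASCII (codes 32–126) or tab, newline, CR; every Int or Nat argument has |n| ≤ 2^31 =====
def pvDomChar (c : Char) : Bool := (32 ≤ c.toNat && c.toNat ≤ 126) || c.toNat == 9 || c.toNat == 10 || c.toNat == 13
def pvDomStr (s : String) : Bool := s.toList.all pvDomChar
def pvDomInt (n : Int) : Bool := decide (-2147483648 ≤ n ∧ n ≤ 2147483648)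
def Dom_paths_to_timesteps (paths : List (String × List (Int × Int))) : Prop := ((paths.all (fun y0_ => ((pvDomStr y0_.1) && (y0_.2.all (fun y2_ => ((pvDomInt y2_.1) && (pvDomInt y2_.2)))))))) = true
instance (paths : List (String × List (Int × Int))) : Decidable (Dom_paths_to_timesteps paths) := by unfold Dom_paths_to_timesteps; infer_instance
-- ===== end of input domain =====

-- B pads every path once to the common length and then transposes column-wise,
-- replacing A's per-timestep index-selection loop (objective: alternative decomposition).

-- ===== PORT A =====
-- A receives a Python dict; the assoc-list argument is turned into the dict (last value
-- per key wins, first position kept) exactly as dict(pairs) does, then A's loops run on it.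
def paths_to_timesteps (paths : List (String × List (Int × Int))) : List (List (String × Int × Int)) :=
  let d : PySem.Dict String (List (Int × Int)) := PySem.Dict.ofList paths
  if d.items.isEmpty then []
  else
    let maxLen : Int := (PySem.List.max? (d.values.map (fun c => (c.length : Int))) id).getD 0
    (PySem.List.pyRange 0 maxLen 1).foldl
      (fun ts t =>
        ts ++ [ (d.items.foldl
                  (fun (step : PySem.Dict String (Int × Int)) kv =>
                    step.insert kv.1
                      (if t < (kv.2.length : Int)
                       then PySem.List.pyGetD kv.2 t (0, 0)
                       else PySem.List.pyGetD kv.2 (-1) (0, 0)))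
                  PySem.Dict.empty).items ]) []

-- ===== PORT B =====
-- c if len(c) == max_len else c + [c[-1]] * (max_len - len(c))
def pvPad (m : Int) (c : List (Int × Int)) : List (Int × Int) :=
  if (c.length : Int) = m then c
  else c ++ List.replicate (m - (c.length : Int)).toNat (PySem.List.pyGetD c (-1) (0, 0))

-- zip(*xss): emit the row of heads while every list is non-empty (stops at the shortest)
def pvZipStar (xss : List (List (Int × Int))) : List (List (Int × Int)) :=
  if xss = [] ∨ xss.any (fun l => l.isEmpty) then []
  else (xss.map (fun l => l.headI)) :: pvZipStar (xss.map (fun l => l.tail))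
  termination_by xss.headI.length
  decreasing_by
    rename_i h
    rw [not_or] at h
    obtain ⟨h1, h2⟩ := h
    obtain ⟨x, rest, rfl⟩ := List.exists_cons_of_ne_nil h1
    have hx : x ≠ [] := by
      intro hx
      exact h2 (List.any_eq_true.mpr ⟨x, by simp, by simp [hx]⟩)
    simp only [List.attach_cons, List.map_cons, List.map_map, List.headI_cons, List.length_tail]
    have : 0 < x.length := List.length_pos_iff.mpr hx
    omega

def paths_to_timesteps_alt (paths : List (String × List (Int × Int))) : List (List (String × Int × Int)) :=
  let d : PySem.Dict String (List (Int × Int)) := PySem.Dict.ofList paths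
  if d.items.isEmpty then []
  else
    let keys := d.keys
    let maxLen : Int := (PySem.List.max? (d.values.map (fun c => (c.length : Int))) id).getD 0
    let padded := d.values.map (pvPad maxLen)
    (pvZipStar padded).map (fun col => (PySem.Dict.ofList (keys.zip col)).items)

-- ===== PRECONDITION & SPEC =====
-- Pre_ excludes the inputs on which the effective dict mixes empty and non-empty paths:
-- there both A and B raise IndexError (cells[-1] on an empty list), so neither returns.
def Pre_paths_to_timesteps (paths : List (String × List (Int × Int))) : Prop :=
  (∀ v ∈ (PySem.Dict.ofList paths).values, v ≠ []) ∨
  (∀ v ∈ (PySem.Dict.ofList paths).values, v = [])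
instance (paths : List (String × List (Int × Int))) : Decidable (Pre_paths_to_timesteps paths) := by unfold Pre_paths_to_timesteps; infer_instance
def pvWitness_paths_to_timesteps : (List (String × List (Int × Int))) :=
  [("a", [(0, 0)]), ("b", [(1, 1), (2, 2)])]
def Spec_paths_to_timesteps (paths : List (String × List (Int × Int))) (out : List (List (String × Int × Int))) : Prop := out = paths_to_timesteps_alt paths
instance (paths : List (String × List (Int × Int))) (out : List (List (String × Int × Int))) : Decidable (Spec_paths_to_timesteps paths out) := by unfold Spec_paths_to_timesteps; infer_instance

-- ===== CLAIM (what is proved, stated in full; the proofs are below) =====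
def Claim_equal_paths_to_timesteps : Prop := ∀ (paths : List (String × List (Int × Int))), Dom_paths_to_timesteps paths → Pre_paths_to_timesteps paths → Spec_paths_to_timesteps paths (paths_to_timesteps paths)

-- ===== LEMMAS AND PROOFS =====

-- l.headI and l.tail.getD against l.getD, with the (0,0) default
lemma pv_headI_eq_getD (l : List (Int × Int)) : l.headI = l.getD 0 (0, 0) := by
  cases l <;> rfl

lemma pv_tail_getD (l : List (Int × Int)) (i : Nat) :
    l.tail.getD i (0, 0) = l.getD (i + 1) (0, 0) := by
  cases l <;> rfl

-- zip(*xss) on equal-length lists is the list of columns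
lemma pvZipStar_eq (N : Nat) : ∀ (xss : List (List (Int × Int))), xss ≠ [] →
    (∀ l ∈ xss, l.length = N) →
    pvZipStar xss = (List.range N).map (fun i => xss.map (fun l => l.getD i (0, 0))) := by
  induction N with
  | zero =>
    intro xss hne hlen
    rw [pvZipStar]
    obtain ⟨x, rest, rfl⟩ := List.exists_cons_of_ne_nil hne
    have hx : x.length = 0 := hlen x (by simp)
    simp [List.length_eq_zero_iff.mp hx]
  | succ N ih =>
    intro xss hne hlen
    rw [pvZipStar]
    have hcond : ¬ (xss = [] ∨ xss.any (fun l => l.isEmpty)) := by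
      rw [not_or]
      refine ⟨hne, fun hany => ?_⟩
      obtain ⟨l, hl, hle'⟩ := List.any_eq_true.mp hany
      have hll := hlen l hl
      have hl0 : l = [] := by simpa using hle'
      rw [hl0] at hll
      simp at hll
    rw [if_neg hcond]
    have htail : pvZipStar (xss.map (fun l => l.tail)) =
        (List.range N).map (fun i => (xss.map (fun l => l.tail)).map (fun l => l.getD i (0, 0))) := by
      refine ih _ (by simpa using hne) ?_
      intro l hl
      obtain ⟨l', hl', rfl⟩ := List.mem_map.mp hl
      have := hlen l' hl'
      simp [this]
    rw [htail, List.range_succ_eq_map]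
    simp only [List.map_cons, List.map_map]
    congr 1
    · exact List.map_congr_left (fun l _ => pv_headI_eq_getD l)
    · apply List.map_congr_left
      intro i _
      simp only [Function.comp]
      exact List.map_congr_left (fun l _ => pv_tail_getD l i)

-- the padded list has length N and reads back A's "cells[t] if t < len else cells[-1]"
lemma pv_pad_length (m : Int) (c : List (Int × Int)) (hle : (c.length : Int) ≤ m) :
    (pvPad m c).length = m.toNat := by
  unfold pvPad
  split_ifs with h
  · omega
  · simp only [List.length_append, List.length_replicate]
    omega

lemma pv_pad_getD (m : Int) (c : List (Int × Int)) (hle : (c.length : Int) ≤ m)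
    (i : Nat) (hi : i < m.toNat) :
    (pvPad m c).getD i (0, 0) =
      (if (i : Int) < (c.length : Int) then PySem.List.pyGetD c (i : Int) (0, 0)
       else PySem.List.pyGetD c (-1) (0, 0)) := by
  unfold pvPad
  split_ifs with h hlt hlt
  · rw [PySem.List.pyGetD_natCast]
  · exfalso; omega
  · rw [PySem.List.pyGetD_natCast]
    have hilt : i < c.length := by exact_mod_cast hlt
    simp [List.getD, List.getElem?_append_left hilt]
  · have hige : c.length ≤ i := by omega
    have : i - c.length < (m - (c.length : Int)).toNat := by omega
    have h2 : i - c.length < m.toNat - c.length := by omega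
    simp [List.getD, List.getElem?_append_right hige, h2]

-- ===== VERDICT (by name: the statement is the Claim_ definition above) =====
theorem paths_to_timesteps_spec : Claim_equal_paths_to_timesteps := by
  intro paths _ hpre
  unfold Spec_paths_to_timesteps paths_to_timesteps paths_to_timesteps_alt
  set d : PySem.Dict String (List (Int × Int)) := PySem.Dict.ofList paths with hd
  by_cases hemp : d.items.isEmpty
  · simp [hemp]
  · have hfalse : d.items.isEmpty = false := by simpa using hemp
    simp only [hfalse, Bool.false_eq_true, if_false]
    have hitems : d.items ≠ [] := by simpa [List.isEmpty_iff] using hemp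
    have hvne : d.values ≠ [] := by simpa [PySem.Dict.values] using hitems
    have hnd : d.keys.Nodup := PySem.Dict.nodup_keys_ofList paths
    -- the maximum length
    obtain ⟨m, hm⟩ : ∃ m, PySem.List.max? (d.values.map (fun c => (c.length : Int))) id = some m := by
      cases hmx : PySem.List.max? (d.values.map (fun c => (c.length : Int))) id with
      | none => exact absurd ((PySem.List.max?_eq_none_iff _ _).mp hmx) (by simpa using hvne)
      | some m => exact ⟨m, rfl⟩
    have hmem := PySem.List.max?_mem hm
    have hle : ∀ c ∈ d.values, (c.length : Int) ≤ m := by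
      intro c hc
      have := PySem.List.max?_isMax hm ((c.length : Int)) (List.mem_map.mpr ⟨c, hc, rfl⟩)
      simpa using this
    obtain ⟨c₀, hc₀, hc₀m⟩ := List.mem_map.mp hmem
    simp only [hm, Option.getD_some]
    rcases hpre with hall | hall
    · -- every path non-empty: 1 ≤ m
      have hm1 : 1 ≤ m := by
        have : c₀ ≠ [] := hall c₀ hc₀
        have : 0 < c₀.length := List.length_pos_iff.mpr this
        omega
      have hmN : ((m.toNat : Int)) = m := Int.toNat_of_nonneg (by omega)
      -- A side: range fold of appended singletons = map over the timesteps
      rw [PySem.List.pyRange_one]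
      rw [List.foldl_map]
      have hA : ∀ (acc : List (List (String × Int × Int))),
          List.foldl (fun ts (k : Nat) =>
            ts ++ [ (d.items.foldl
                  (fun (step : PySem.Dict String (Int × Int)) kv =>
                    step.insert kv.1
                      (if (0 + (k : Int)) < (kv.2.length : Int)
                       then PySem.List.pyGetD kv.2 (0 + (k : Int)) (0, 0)
                       else PySem.List.pyGetD kv.2 (-1) (0, 0)))
                  PySem.Dict.empty).items ]) acc (List.range (m - 0).toNat)
          = acc ++ (List.range (m - 0).toNat).map (fun (k : Nat) =>
              d.items.map (fun kv => (kv.1,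
                (if ((k : Int)) < (kv.2.length : Int)
                 then PySem.List.pyGetD kv.2 ((k : Int)) (0, 0)
                 else PySem.List.pyGetD kv.2 (-1) (0, 0))))) := by
        intro acc
        rw [PySem.List.foldl_append_singleton_eq_map]
        congr 1
        apply List.map_congr_left
        intro k _
        rw [PySem.Dict.items_foldl_insert_fresh d.items (fun kv => kv.1)
              (fun kv => (if (0 + (k : Int)) < (kv.2.length : Int)
                 then PySem.List.pyGetD kv.2 (0 + (k : Int)) (0, 0)
                 else PySem.List.pyGetD kv.2 (-1) (0, 0)))
              PySem.Dict.empty (fun a _ => PySem.Dict.contains_empty _) hnd]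
        simp only [show (PySem.Dict.empty : PySem.Dict String (Int × Int)).items = [] from rfl,
          List.nil_append, zero_add]
      rw [hA]
      -- B side
      have hpadne : d.values.map (pvPad m) ≠ [] := by simpa using hvne
      have hpadlen : ∀ l ∈ d.values.map (pvPad m), l.length = m.toNat := by
        intro l hl
        obtain ⟨c, hc, rfl⟩ := List.mem_map.mp hl
        exact pv_pad_length m c (hle c hc)
      rw [pvZipStar_eq m.toNat _ hpadne hpadlen]
      rw [List.map_map]
      simp only [List.nil_append]
      have hrange : (m - 0).toNat = m.toNat := by omega
      rw [hrange]
      apply List.map_congr_left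
      intro i hi
      have hiN : i < m.toNat := List.mem_range.mp hi
      simp only [Function.comp_apply]
      -- the i-th column read through the padded table is A's i-th step
      have hcol : (d.values.map (pvPad m)).map (fun l => l.getD i (0, 0)) =
          d.values.map (fun c =>
            (if (i : Int) < (c.length : Int) then PySem.List.pyGetD c (i : Int) (0, 0)
             else PySem.List.pyGetD c (-1) (0, 0))) := by
        rw [List.map_map]
        apply List.map_congr_left
        intro c hc
        exact pv_pad_getD m c (hle c hc) i hiN
      rw [hcol]
      -- dict(zip(keys, column)).items
      have hzip : d.keys.zip (d.values.map (fun c =>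
            (if (i : Int) < (c.length : Int) then PySem.List.pyGetD c (i : Int) (0, 0)
             else PySem.List.pyGetD c (-1) (0, 0)))) =
          d.items.map (fun kv => (kv.1,
            (if (i : Int) < (kv.2.length : Int) then PySem.List.pyGetD kv.2 (i : Int) (0, 0)
             else PySem.List.pyGetD kv.2 (-1) (0, 0)))) := by
        simp only [PySem.Dict.keys, PySem.Dict.values, List.map_map]
        rw [List.zip_map']
        simp [Function.comp]
      rw [hzip]
      have hfresh : ∀ a ∈ d.items.map (fun kv => (kv.1,
            (if (i : Int) < (kv.2.length : Int) then PySem.List.pyGetD kv.2 (i : Int) (0, 0)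
             else PySem.List.pyGetD kv.2 (-1) (0, 0)))),
          (PySem.Dict.empty : PySem.Dict String (Int × Int)).contains a.1 = false :=
        fun a _ => PySem.Dict.contains_empty _
      have hnd2 : ((d.items.map (fun kv => (kv.1,
            (if (i : Int) < (kv.2.length : Int) then PySem.List.pyGetD kv.2 (i : Int) (0, 0)
             else PySem.List.pyGetD kv.2 (-1) (0, 0))))).map (fun p => p.1)).Nodup := by
        simpa [List.map_map, Function.comp, PySem.Dict.keys] using hnd
      unfold PySem.Dict.ofList PySem.Dict.update
      rw [PySem.Dict.items_foldl_insert_fresh _ (fun p => p.1) (fun p => p.2)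
            PySem.Dict.empty hfresh hnd2]
      simp [show (PySem.Dict.empty : PySem.Dict String (Int × Int)).items = [] from rfl]
    · -- every path empty: max_len = 0, both sides are []
      have hm0 : m = 0 := by
        have : c₀ = [] := hall c₀ hc₀
        simp [this] at hc₀m
        omega
      subst hm0
      rw [show PySem.List.pyRange 0 0 1 = [] from rfl]
      simp only [List.foldl_nil]
      rw [pvZipStar]
      have : (d.values.map (pvPad 0)).any (fun l => l.isEmpty) = true := by
        obtain ⟨v, rest, hv⟩ := List.exists_cons_of_ne_nil hvne
        have hvmem : v ∈ d.values := by rw [hv]; simp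
        have hv0 : v = [] := hall v hvmem
        refine List.any_eq_true.mpr ⟨pvPad 0 v, List.mem_map.mpr ⟨v, hvmem, rfl⟩, ?_⟩
        simp [hv0, pvPad]
      simp [this]
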